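-- pv_equiv track=rewrite | github.com/marcosavion/munics-master | SI/Lab3/Lab3_MarcosVillar.py | generateTotalNodes
-- ===== SOURCE A (Python) =====
-- def generateTotalNodes(n_devices: int) -> list():
--     '''
--     This method calculates the number of total nodes that we have to use to create the binary tree
--     '''
--     n_nodos = 2 * n_devices - 1
--
--     exp = 1
--     while(n_nodos>2**exp):
--         exp +=1
--
--     n_nodos = 2**exp
--
--     nodes = list()
--
--     no_nodes = int(n_nodos/2) - n_devices
--
--     for n_node in range(1,n_nodos-no_nodes,1):
--         nodes.append(n_node)
--
--     return nodes
-- ===== SOURCE B (Python) =====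
-- def generateTotalNodes(n_devices: int) -> list():
--     # Smallest power of two >= n_devices (1 for n_devices <= 1), by recursive halving:
--     # pow2_ge(m) = 2 * pow2_ge(ceil(m/2)); then the tree's leaf layer starts the count.
--     def pow2_ge(m: int) -> int:
--         if m <= 1:
--             return 1
--         return 2 * pow2_ge((m + 1) // 2)
--     return list(range(1, pow2_ge(n_devices) + n_devices))
-- ===== Notes on version B (the rewrite author's own statement) =====
-- stated objective: alternative
-- what changed: B computes the leaf-layer size as the smallest power of two >= n_devices by a divide-and-conquer halving recursion (pow2_ge(m) = 2*pow2_ge(ceil(m/2))) and emits the node list as one range, instead of A's bottom-up exponent search comparing 2*n-1 against successive powers of two followed by an element-by-element append loop.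
import Mathlib
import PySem

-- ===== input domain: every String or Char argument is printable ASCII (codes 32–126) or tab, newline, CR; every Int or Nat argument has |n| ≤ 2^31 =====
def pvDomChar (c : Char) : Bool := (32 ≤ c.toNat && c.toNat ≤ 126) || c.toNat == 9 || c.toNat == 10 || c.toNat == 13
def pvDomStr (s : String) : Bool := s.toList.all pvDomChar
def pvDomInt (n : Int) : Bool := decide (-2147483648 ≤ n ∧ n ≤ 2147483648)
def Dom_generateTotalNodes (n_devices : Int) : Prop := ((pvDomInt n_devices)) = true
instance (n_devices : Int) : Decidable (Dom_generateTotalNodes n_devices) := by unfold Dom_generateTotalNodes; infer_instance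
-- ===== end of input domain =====

-- B finds the leaf-layer size (smallest power of two ≥ n_devices) by a divide-and-conquer
-- halving recursion and emits one range, instead of A's upward exponent search over 2*n-1
-- plus an append loop (objective: alternative; not claimed faster).

-- ===== PORT A =====
-- the while loop: while n_nodos > 2**exp: exp += 1
def pvLoopA (n_nodos : Int) (exp : Nat) : Nat :=
  if n_nodos > 2 ^ exp then pvLoopA n_nodos (exp + 1) else exp
termination_by (n_nodos - 2 ^ exp).toNat
decreasing_by
  have h1 : (0:Int) < 2 ^ exp := by positivity
  simp only [pow_succ]
  omega

def generateTotalNodes (n_devices : Int) : List Int :=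
  let n_nodos := 2 * n_devices - 1
  let exp := pvLoopA n_nodos 1
  let n_nodos2 : Int := 2 ^ exp
  -- int(n_nodos/2): n_nodos2 is a positive power of two, so the float division is
  -- exact and truncation agrees with Int division
  let no_nodes : Int := n_nodos2 / 2 - n_devices
  (PySem.List.pyRange 1 (n_nodos2 - no_nodes) 1).foldl (fun acc n => acc ++ [n]) []

-- ===== PORT B =====
-- pow2_ge(m) = 1 if m <= 1 else 2 * pow2_ge((m + 1) // 2)
def pvPow2Ge (m : Int) : Int :=
  if m ≤ 1 then 1 else 2 * pvPow2Ge (PySem.Int.floordiv (m + 1) 2)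
termination_by m.toNat
decreasing_by
  rw [PySem.Int.floordiv_eq_ediv_of_pos (by omega)]
  omega

def generateTotalNodes_alt (n_devices : Int) : List Int :=
  PySem.List.pyRange 1 (pvPow2Ge n_devices + n_devices) 1

-- ===== PRECONDITION & SPEC =====
def Spec_generateTotalNodes (n_devices : Int) (out : List Int) : Prop := out = generateTotalNodes_alt n_devices
instance (n_devices : Int) (out : List Int) : Decidable (Spec_generateTotalNodes n_devices out) := by unfold Spec_generateTotalNodes; infer_instance

-- ===== CLAIM (what is proved, stated in full; the proofs are below) =====
def Claim_equal_generateTotalNodes : Prop := ∀ (n_devices : Int), Dom_generateTotalNodes n_devices → Spec_generateTotalNodes n_devices (generateTotalNodes n_devices)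

-- ===== LEMMAS AND PROOFS =====

-- appending one element at a time is just the list itself
theorem pv_foldl_append (l : List Int) (init : List Int) :
    l.foldl (fun acc n => acc ++ [n]) init = init ++ l := by
  induction l generalizing init with
  | nil => simp
  | cons x xs ih => simp [List.foldl_cons, ih]

-- B's recursion returns a power of two p with m ≤ p < 2*m (p = 1 when m ≤ 1)
theorem pv_pow2ge_spec (m : Int) (hm : 2 ≤ m) :
    ∃ k : Nat, pvPow2Ge m = 2 ^ k ∧ m ≤ 2 ^ k ∧ (2:Int) ^ k < 2 * m := by
  rw [pvPow2Ge, if_neg (by omega), PySem.Int.floordiv_eq_ediv_of_pos (by omega)]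
  by_cases h2 : 2 ≤ (m + 1) / 2
  · obtain ⟨k, hk, hk1, hk2⟩ := pv_pow2ge_spec ((m + 1) / 2) h2
    refine ⟨k + 1, by rw [hk]; ring, ?_, ?_⟩ <;>
    · have hev : (2:Int) ^ k = 1 ∨ (2:Int) ∣ 2 ^ k := by
        cases k with
        | zero => left; norm_num
        | succ j => right; exact Dvd.intro (2 ^ j) (by ring)
      simp only [pow_succ]
      rcases hev with h | ⟨c, hc⟩ <;> omega
  · have hm2 : m = 2 := by omega
    subst hm2
    have hh : ((2:Int) + 1) / 2 = 1 := by decide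
    refine ⟨1, ?_, by norm_num, by norm_num⟩
    rw [hh, pvPow2Ge]
    norm_num
termination_by m.toNat
decreasing_by omega

-- the loop result e satisfies m ≤ 2^e, and 2^(e-1) < m unless it never stepped
theorem pv_loopA_spec (m : Int) (e : Nat) :
    ∃ e' : Nat, pvLoopA m e = e' ∧ e ≤ e' ∧ m ≤ 2 ^ e' ∧ (e' = e ∨ (2:Int) ^ (e' - 1) < m) := by
  rw [pvLoopA]
  by_cases h : m > 2 ^ e
  · rw [if_pos h]
    obtain ⟨e', h1, h2, h3, h4⟩ := pv_loopA_spec m (e + 1)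
    exact ⟨e', h1, by omega, h3, Or.inr (by
      rcases h4 with h4 | h4
      · subst h4
        simpa using h
      · exact h4)⟩
  · exact ⟨e, by rw [if_neg h], le_refl _, by omega, Or.inl rfl⟩
termination_by (m - 2 ^ e).toNat
decreasing_by
  have h1 : (0:Int) < 2 ^ e := by positivity
  simp only [pow_succ]
  omega

-- a power of two in [m, 2m) is unique
theorem pv_pow_unique (m : Int) (a b : Nat) (_hm : 1 ≤ m)
    (ha1 : m ≤ 2 ^ a) (ha2 : (2:Int) ^ a < 2 * m)
    (hb1 : m ≤ 2 ^ b) (hb2 : (2:Int) ^ b < 2 * m) : (2:Int) ^ a = 2 ^ b := by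
  have hab : a ≤ b := by
    by_contra h
    have hb1' : (2:Int) ^ (b + 1) ≤ 2 ^ a :=
      pow_le_pow_right₀ (by norm_num) (by omega)
    rw [pow_succ] at hb1'
    omega
  have hba : b ≤ a := by
    by_contra h
    have ha1' : (2:Int) ^ (a + 1) ≤ 2 ^ b :=
      pow_le_pow_right₀ (by norm_num) (by omega)
    rw [pow_succ] at ha1'
    omega
  rw [le_antisymm hab hba]

-- ===== VERDICT (by name: the statement is the Claim_ definition above) =====
theorem generateTotalNodes_spec : Claim_equal_generateTotalNodes := by
  intro n _hd
  unfold Spec_generateTotalNodes generateTotalNodes generateTotalNodes_alt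
  simp only []
  rw [pv_foldl_append, List.nil_append]
  obtain ⟨e, he, he1, he2, he3⟩ := pv_loopA_spec (2 * n - 1) 1
  rw [he]
  -- half = 2^e / 2 = 2^(e-1)
  obtain ⟨j, hj⟩ : ∃ j, e = j + 1 := ⟨e - 1, by omega⟩
  subst hj
  have hdiv : (2:Int) ^ (j + 1) / 2 = 2 ^ j := by
    rw [pow_succ, mul_comm]; exact Int.mul_ediv_cancel_left _ (by norm_num)
  have hend : (2:Int) ^ (j + 1) - ((2:Int) ^ (j + 1) / 2 - n) = 2 ^ j + n := by
    rw [hdiv, pow_succ]; ring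
  rw [hend]
  by_cases hn : 2 ≤ n
  · -- 2^j is a power of two with n ≤ 2^j < 2n, as is pvPow2Ge n
    obtain ⟨k, hk, hk1, hk2⟩ := pv_pow2ge_spec n hn
    have hj1 : n ≤ 2 ^ j := by
      -- 2n-1 ≤ 2^(j+1), and 2^(j+1) is even while 2n-1 is odd
      have hev : (2:Int) ∣ 2 ^ (j + 1) := Dvd.intro (2 ^ j) (by rw [pow_succ]; ring)
      obtain ⟨c, hc⟩ := hev
      simp only [pow_succ] at he2 hc ⊢
      omega
    have hj2 : (2:Int) ^ j < 2 * n := by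
      rcases he3 with h | h
      · -- e = 1, i.e. j = 0: 2*n-1 ≤ 2^1 contradicts 2 ≤ n... no: then 2^0 = 1 < 2n
        have : j = 0 := by omega
        simp [this]; omega
      · simpa using (by omega : (2:Int) ^ (j + 1 - 1) < 2 * n)
    rw [hk, pv_pow_unique n j k (by omega) hj1 hj2 hk1 hk2]
  · -- n ≤ 1: loop never steps (2n-1 ≤ 2 = 2^1), so e = 1, j = 0; pvPow2Ge n = 1
    have hne : ¬ ((2:Int) * n - 1 > 2 ^ 1) := by norm_num; omega
    have he0 : j + 1 = 1 := by
      rcases he3 with h | h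
      · omega
      · -- 2^(j+1-1) < 2n-1 ≤ 1, impossible since 2^_ ≥ 1
        exfalso
        have : (1:Int) ≤ 2 ^ (j + 1 - 1) := one_le_pow₀ (by norm_num)
        omega
    have hj0 : j = 0 := by omega
    subst hj0
    rw [pvPow2Ge, if_pos (by omega)]
    norm_num
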